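-- pv_equiv track=rewrite | github.com/RazorJDCZ/Metodos_de_Busqueda_e_Heuristicas | Tic_tac_toe.py | es_subtablero
-- ===== SOURCE A (Python) =====
-- from typing import List, Tuple, Optional, Callable, Set
--
-- Tablero = Tuple[str, ...]
--
-- def es_subtablero(inicial: Tablero, final: Tablero) -> bool:
--     """
--     Inicial sólo puede tener marcas que también estén en el final (no se puede borrar ni sobreescribir).
--     """
--     for i, v in enumerate(inicial):
--         if v == '_':
--             continue
--         if v != final[i]:
--             return False
--
--     if sum(1 for v in final if v=='X') < sum(1 for v in inicial if v=='X'):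
--         return False
--     if sum(1 for v in final if v=='O') < sum(1 for v in inicial if v=='O'):
--         return False
--     return True
-- ===== SOURCE B (Python) =====
-- def es_subtablero(inicial, final):
--     for i in range(len(inicial)):
--         v = inicial[i]
--         if v != '_' and v != final[i]:
--             return False
--     return True
-- ===== Notes on version B (the rewrite author's own statement) =====
-- stated objective: simpler
-- what changed: B is a single index loop that checks only the non-'_' cells of inicial against final and returns True, dropping A's two counting passes over both boards, which are provably redundant once every non-'_' cell matches.
import Mathlib
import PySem

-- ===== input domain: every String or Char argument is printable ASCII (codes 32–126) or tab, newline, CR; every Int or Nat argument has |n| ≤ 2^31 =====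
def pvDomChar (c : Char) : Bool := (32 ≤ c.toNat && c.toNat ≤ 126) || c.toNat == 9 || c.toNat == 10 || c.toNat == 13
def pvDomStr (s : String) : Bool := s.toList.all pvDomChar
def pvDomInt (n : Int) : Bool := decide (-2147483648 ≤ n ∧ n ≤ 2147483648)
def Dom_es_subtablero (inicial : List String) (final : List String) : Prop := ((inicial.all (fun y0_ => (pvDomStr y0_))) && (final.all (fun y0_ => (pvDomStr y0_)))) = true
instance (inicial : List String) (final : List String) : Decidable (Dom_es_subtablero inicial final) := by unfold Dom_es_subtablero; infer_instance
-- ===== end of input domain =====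

-- B drops A's two redundant counting passes: one loop over the non-'_' cells suffices (simpler).
-- ===== PORT A =====
-- the 'for i, v in enumerate(inicial)' loop; none = IndexError on final[i]
def pvCellsA (final : List String) : List String → Nat → Option Bool
  | [], _ => some true
  | v :: rest, i =>
      if v == "_" then pvCellsA final rest (i + 1)
      else
        match final[i]? with
        | none => none
        | some f => if v != f then some false else pvCellsA final rest (i + 1)

-- sum(1 for v in l if v == c)
def pvCount (c : String) (l : List String) : Int :=
  l.foldl (fun acc v => if v == c then acc + 1 else acc) 0

def es_subtablero (inicial : List String) (final : List String) : Bool :=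
  match pvCellsA final inicial 0 with
  | none => false   -- IndexError; excluded by Pre_
  | some false => false
  | some true =>
      if pvCount "X" final < pvCount "X" inicial then false
      else if pvCount "O" final < pvCount "O" inicial then false
      else true

-- ===== PORT B =====
-- 'for i in range(len(inicial))' index loop; where B's Python raises (outside Pre_) this returns false
def pvLoopB (inicial final : List String) (i : Nat) : Bool :=
  if i < inicial.length then
    let v := inicial.getD i ""
    if v ≠ "_" ∧ final[i]? ≠ some v then false else pvLoopB inicial final (i + 1)
  else true
termination_by inicial.length - i

def es_subtablero_alt (inicial : List String) (final : List String) : Bool :=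
  pvLoopB inicial final 0

-- ===== PRECONDITION & SPEC =====
-- Pre_ excludes exactly the inputs where A raises IndexError (a non-'_' cell of inicial at an
-- index beyond final's length that the loop reaches, i.e. with no earlier in-range mismatch).
def Pre_es_subtablero (inicial : List String) (final : List String) : Prop :=
  ∀ i, i < inicial.length → inicial.getD i "" ≠ "_" → final.length ≤ i →
    ∃ j, j < i ∧ inicial.getD j "" ≠ "_" ∧ j < final.length ∧ inicial.getD j "" ≠ final.getD j ""

instance (inicial : List String) (final : List String) : Decidable (Pre_es_subtablero inicial final) := by
  unfold Pre_es_subtablero; exact Nat.decidableBallLT _ _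

def pvWitness_es_subtablero : List String × List String := (["X", "_", "O"], ["X", "O", "O"])

def Spec_es_subtablero (inicial : List String) (final : List String) (out : Bool) : Prop := out = es_subtablero_alt inicial final
instance (inicial : List String) (final : List String) (out : Bool) : Decidable (Spec_es_subtablero inicial final out) := by unfold Spec_es_subtablero; infer_instance

-- ===== CLAIM (what is proved, stated in full; the proofs are below) =====
def Claim_equal_es_subtablero : Prop := ∀ (inicial : List String) (final : List String), Dom_es_subtablero inicial final → Pre_es_subtablero inicial final → Spec_es_subtablero inicial final (es_subtablero inicial final)

-- ===== LEMMAS AND PROOFS =====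

-- basic facts about a drop-suffix
theorem pvDrop_cons_getElem? {α : Type} (l : List α) (i : Nat) (v : α) (rest : List α)
    (hd : l.drop i = v :: rest) : l[i]? = some v := by
  have h0 : (l.drop i)[0]? = l[i + 0]? := List.getElem?_drop
  rw [hd] at h0
  simpa using h0.symm

theorem pvDrop_cons_tail {α : Type} (l : List α) (i : Nat) (v : α) (rest : List α)
    (hd : l.drop i = v :: rest) : l.drop (i + 1) = rest := by
  have : l.drop (i + 1) = (l.drop i).drop 1 := by
    rw [List.drop_drop]
  simp [this, hd]

-- If the cell loop finishes with `some r`, B's index loop returns r.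
theorem pvLoopB_of_cellsA (final inicial : List String) :
    ∀ (l : List String) (i : Nat) (r : Bool), inicial.drop i = l →
      pvCellsA final l i = some r → pvLoopB inicial final i = r := by
  intro l
  induction l with
  | nil =>
      intro i r hd hc
      simp [pvCellsA] at hc
      have hlen : inicial.length ≤ i := List.drop_eq_nil_iff.mp hd
      rw [pvLoopB, if_neg (by omega)]
      exact hc.symm
  | cons v rest ih =>
      intro i r hd hc
      have hi : i < inicial.length := by
        by_contra h
        rw [List.drop_eq_nil_of_le (by omega)] at hd
        simp at hd
      have hv? : inicial[i]? = some v := pvDrop_cons_getElem? _ _ _ _ hd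
      have hv : inicial.getD i "" = v := by
        simp [List.getD_eq_getElem?_getD, hv?]
      have htail : inicial.drop (i + 1) = rest := pvDrop_cons_tail _ _ _ _ hd
      rw [pvLoopB, if_pos hi]
      simp only [hv]
      by_cases hu : v = "_"
      · subst hu
        rw [pvCellsA] at hc
        simp at hc
        rw [if_neg (by simp)]
        exact ih (i + 1) r htail hc
      · cases hf : final[i]? with
        | none =>
            have hc' : (none : Option Bool) = some r := by
              rw [pvCellsA, if_neg (by simpa using hu), hf] at hc; exact hc
            exact absurd hc' (by simp)
        | some f =>
            have hc' : (if (v != f) = true then some false else pvCellsA final rest (i + 1)) = some r := by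
              rw [pvCellsA, if_neg (by simpa using hu), hf] at hc; exact hc
            by_cases hvf : v = f
            · subst hvf
              rw [if_neg (by simp)] at hc'
              rw [if_neg (by simp [hu])]
              exact ih (i + 1) r htail hc'
            · rw [if_pos (by simpa using hvf)] at hc'
              rw [if_pos (by simp [hu]; exact fun h => hvf h.symm)]
              simpa using hc'.symm

-- If the cell loop passes, every non-'_' cell of the suffix matches final.
theorem pvCellsA_true_match (final : List String) :
    ∀ (l : List String) (i : Nat), pvCellsA final l i = some true →
      ∀ j, j < l.length → l.getD j "" ≠ "_" → final[i + j]? = some (l.getD j "") := by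
  intro l
  induction l with
  | nil => intro i _ j hj; simp at hj
  | cons v rest ih =>
      intro i hc j hj hne
      by_cases hu : v = "_"
      · subst hu
        rw [pvCellsA, if_pos (by simp)] at hc
        cases j with
        | zero => simp at hne
        | succ k =>
            have := ih (i + 1) hc k (by simpa using hj) (by simpa using hne)
            have harith : i + (k + 1) = i + 1 + k := by omega
            rw [harith]
            simpa using this
      · cases hf : final[i]? with
        | none =>
            exact absurd (by rw [pvCellsA, if_neg (by simpa using hu), hf] at hc; exact hc :
              (none : Option Bool) = some true) (by simp)
        | some f =>
            have hc' : (if (v != f) = true then some false else pvCellsA final rest (i + 1)) = some true := by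
              rw [pvCellsA, if_neg (by simpa using hu), hf] at hc; exact hc
            by_cases hvf : v = f
            · subst hvf
              rw [if_neg (by simp)] at hc'
              cases j with
              | zero => simpa using hf
              | succ k =>
                  have := ih (i + 1) hc' k (by simpa using hj) (by simpa using hne)
                  have harith : i + (k + 1) = i + 1 + k := by omega
                  rw [harith]
                  simpa using this
            · rw [if_pos (by simpa using hvf)] at hc'
              exact absurd hc' (by simp)

-- If the cell loop hits an IndexError, there is an out-of-range non-'_' cell with no earlier mismatch.
theorem pvCellsA_none (final : List String) :
    ∀ (l : List String) (i : Nat), pvCellsA final l i = none →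
      ∃ k, i ≤ k ∧ k < i + l.length ∧ l.getD (k - i) "" ≠ "_" ∧ final.length ≤ k ∧
        ∀ j, i ≤ j → j < k →
          l.getD (j - i) "" = "_" ∨ (j < final.length ∧ l.getD (j - i) "" = final.getD j "") := by
  intro l
  induction l with
  | nil => intro i hc; rw [pvCellsA] at hc; exact absurd hc (by simp)
  | cons v rest ih =>
      intro i hc
      by_cases hu : v = "_"
      · subst hu
        rw [pvCellsA, if_pos (by simp)] at hc
        obtain ⟨k, hik, hkl, hne, hfl, hinv⟩ := ih (i + 1) hc
        refine ⟨k, by omega, by simp only [List.length_cons]; omega, ?_, hfl, ?_⟩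
        · have : k - i = (k - (i + 1)) + 1 := by omega
          simpa [this] using hne
        · intro j hij hjk
          rcases Nat.eq_or_lt_of_le hij with h | h
          · left; simp [← h]
          · have := hinv j (by omega) hjk
            have hji : j - i = (j - (i + 1)) + 1 := by omega
            simpa [hji] using this
      · cases hf : final[i]? with
        | none =>
            refine ⟨i, le_refl i, by simp, by simpa using hu, ?_, ?_⟩
            · by_contra h
              exact absurd hf (by simp; omega)
            · intro j hij hjk; omega
        | some f =>
            have hc' : (if (v != f) = true then some false else pvCellsA final rest (i + 1)) = none := by
              rw [pvCellsA, if_neg (by simpa using hu), hf] at hc; exact hc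
            by_cases hvf : v = f
            · subst hvf
              rw [if_neg (by simp)] at hc'
              obtain ⟨k, hik, hkl, hne, hfl, hinv⟩ := ih (i + 1) hc' 
              have hiflen : i < final.length := (List.getElem?_eq_some_iff.mp hf).1
              refine ⟨k, by omega, by simp only [List.length_cons]; omega, ?_, hfl, ?_⟩
              · have : k - i = (k - (i + 1)) + 1 := by omega
                simpa [this] using hne
              · intro j hij hjk
                rcases Nat.eq_or_lt_of_le hij with h | h
                · right
                  refine ⟨by omega, ?_⟩
                  have hji0 : j - i = 0 := by omega
                  have hfj : final[j]? = some v := by rw [← h]; exact hf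
                  simp [hji0, List.getD_eq_getElem?_getD, hfj]
                · have := hinv j (by omega) hjk
                  have hji : j - i = (j - (i + 1)) + 1 := by omega
                  simpa [hji] using this
            · rw [if_pos (by simpa using hvf)] at hc'
              exact absurd hc' (by simp)

-- counting: list count equals count of matching indices
theorem pvCount_eq_countP (c : String) (l : List String) :
    pvCount c l = (l.countP (fun v => v == c) : Int) := by
  simpa [pvCount] using PySem.List.foldl_if_add_one (fun v => v == c) l 0

theorem pvCountP_eq_range (c : String) (l : List String) :
    l.countP (fun v => v == c) =
      ((List.range l.length).filter (fun j => l.getD j "" == c)).length := by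
  have hmap : (List.range l.length).map (fun j => l.getD j "") = l := by
    apply List.ext_getElem
    · simp
    · intro n h1 h2
      simp [List.getD_eq_getElem?_getD, List.getElem?_eq_getElem h2]
  calc l.countP (fun v => v == c)
      = ((List.range l.length).map (fun j => l.getD j "")).countP (fun v => v == c) := by
        rw [hmap]
    _ = (List.range l.length).countP (fun j => l.getD j "" == c) := by
        rw [List.countP_map]; rfl
    _ = ((List.range l.length).filter (fun j => l.getD j "" == c)).length := by
        rw [List.countP_eq_length_filter]

-- under the match hypothesis, inicial has no more c-cells than final (c ≠ '_')
theorem pvCount_le (c : String) (hc : c ≠ "_") (inicial final : List String)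
    (H : ∀ j, j < inicial.length → inicial.getD j "" ≠ "_" → final[j]? = some (inicial.getD j "")) :
    inicial.countP (fun v => v == c) ≤ final.countP (fun v => v == c) := by
  rw [pvCountP_eq_range, pvCountP_eq_range]
  have hsub : ((List.range inicial.length).filter (fun j => inicial.getD j "" == c)) ⊆
      ((List.range final.length).filter (fun j => final.getD j "" == c)) := by
    intro j hj
    rw [List.mem_filter, List.mem_range] at hj
    obtain ⟨hjlen, hjc⟩ := hj
    have hjc' : inicial.getD j "" = c := by simpa using hjc
    have hne : inicial.getD j "" ≠ "_" := by rw [hjc']; exact hc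
    have hm := H j hjlen hne
    have hjf : j < final.length := (List.getElem?_eq_some_iff.mp hm).1
    rw [List.mem_filter, List.mem_range]
    refine ⟨hjf, ?_⟩
    rw [List.getD_eq_getElem?_getD, hm]
    simpa using hjc' 
  have hnd : ((List.range inicial.length).filter (fun j => inicial.getD j "" == c)).Nodup :=
    (List.nodup_range).filter _
  exact (hnd.subperm hsub).length_le

-- ===== VERDICT (by name: the statement is the Claim_ definition above) =====
theorem es_subtablero_spec : Claim_equal_es_subtablero := by
  intro inicial final _ hpre
  unfold Spec_es_subtablero es_subtablero es_subtablero_alt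
  cases hc : pvCellsA final inicial 0 with
  | none =>
      exfalso
      obtain ⟨k, _, hkl, hne, hfl, hinv⟩ := pvCellsA_none final inicial 0 hc
      obtain ⟨j, hjk, hjne, hjf, hjmis⟩ := hpre k (by omega) (by simpa using hne) hfl
      rcases hinv j (by omega) hjk with h | ⟨_, h⟩
      · exact hjne (by simpa using h)
      · exact hjmis (by simpa using h)
  | some r =>
      have hB := pvLoopB_of_cellsA final inicial inicial 0 r (by simp) hc
      cases r with
      | false => simp [hB]
      | true =>
          have H := pvCellsA_true_match final inicial 0 hc
          simp only [Nat.zero_add] at H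
      -- counts are redundant
          have hX := pvCount_le "X" (by decide) inicial final H
          have hO := pvCount_le "O" (by decide) inicial final H
          rw [if_neg, if_neg]
          · exact hB.symm
          · rw [pvCount_eq_countP, pvCount_eq_countP]
            omega
          · rw [pvCount_eq_countP, pvCount_eq_countP]
            omega
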